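-- pv_equiv track=rewrite | github.com/andytaylor823/play-euchre | showturn.py | did_play_card
-- ===== SOURCE A (Python) =====
-- def did_play_card(cards_played, pos, leader_pos):
--
-- 	if len(cards_played) == 0:	return(False)
-- 	all_pos = ['o1', 'p', 'o2', 'd']
-- 	start_idx = all_pos.index(leader_pos)
-- 	played_pos = [all_pos[(i+start_idx)%4] for i in range(len(cards_played))]
-- 	if pos in played_pos:
-- 		return(True)
-- 	return(False)
-- ===== SOURCE B (Python) =====
-- def did_play_card(cards_played, pos, leader_pos):
--     if len(cards_played) == 0:
--         return False
--     all_pos = ['o1', 'p', 'o2', 'd']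
--     start_idx = all_pos.index(leader_pos)
--     if pos not in all_pos:
--         return False
--     return (all_pos.index(pos) - start_idx) % 4 < len(cards_played)
-- ===== Notes on version B (the rewrite author's own statement) =====
-- stated objective: simpler
-- what changed: Instead of materialising the rotated list of positions that already played and scanning it for membership, B computes the seat's offset from the leader with a single modular-index formula (all_pos.index(pos) - start_idx) % 4 < len(cards_played).
import Mathlib
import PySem

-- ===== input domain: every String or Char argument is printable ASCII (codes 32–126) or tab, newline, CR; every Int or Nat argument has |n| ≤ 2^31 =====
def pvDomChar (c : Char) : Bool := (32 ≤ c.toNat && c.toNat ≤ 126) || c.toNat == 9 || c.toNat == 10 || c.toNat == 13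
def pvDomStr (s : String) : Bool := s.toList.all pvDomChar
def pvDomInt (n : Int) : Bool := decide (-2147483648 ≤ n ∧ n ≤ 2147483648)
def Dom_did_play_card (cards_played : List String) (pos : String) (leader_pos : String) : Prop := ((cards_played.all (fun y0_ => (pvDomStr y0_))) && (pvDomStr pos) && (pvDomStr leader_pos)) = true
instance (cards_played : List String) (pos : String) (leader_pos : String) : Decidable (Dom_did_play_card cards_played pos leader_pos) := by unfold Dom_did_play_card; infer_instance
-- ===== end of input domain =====

-- B replaces A's build-rotated-list-then-scan by a closed-form modular-index comparison (objective: simpler).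

-- ===== PORT A =====
-- the literal ['o1','p','o2','d']
def pvAllPos : List String := ["o1", "p", "o2", "d"]

-- transliteration of A; loop indices i and start_idx are nonnegative, so Nat % 4 here
-- is exactly Python's %, and (i+start)%4 < 4 makes getD exact for all_pos[(i+start)%4]
def did_play_card (cards_played : List String) (pos : String) (leader_pos : String) : Bool :=
  if cards_played.length = 0 then false
  else
    match PySem.List.index? pvAllPos leader_pos with
    | none => false   -- Python raises ValueError here; excluded by Pre_
    | some start_idx =>
      let played_pos := (List.range cards_played.length).map
        (fun i => pvAllPos.getD ((i + start_idx) % 4) "")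
      if pos ∈ played_pos then true else false

-- ===== PORT B =====
-- transliteration of Source B: (all_pos.index(pos) - start_idx) % 4 uses Python's int %,
-- so PySem.Int.mod
def did_play_card_alt (cards_played : List String) (pos : String) (leader_pos : String) : Bool :=
  if cards_played.length = 0 then false
  else
    match PySem.List.index? pvAllPos leader_pos with
    | none => false   -- Python raises ValueError here; excluded by Pre_
    | some start_idx =>
      if pos ∈ pvAllPos then
        decide (PySem.Int.mod ((PySem.List.index? pvAllPos pos).getD 0 - start_idx) 4
                < (cards_played.length : Int))
      else false

-- ===== PRECONDITION & SPEC =====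
-- Pre_ excludes exactly the inputs where Python A raises ValueError:
-- a nonempty trick with a leader_pos not among the four seats.
def Pre_did_play_card (cards_played : List String) (pos : String) (leader_pos : String) : Prop :=
  cards_played = [] ∨ leader_pos ∈ pvAllPos
instance (cards_played : List String) (pos : String) (leader_pos : String) : Decidable (Pre_did_play_card cards_played pos leader_pos) := by unfold Pre_did_play_card; infer_instance

def pvWitness_did_play_card : List String × String × String := (["JH", "9S"], "o2", "p")

def Spec_did_play_card (cards_played : List String) (pos : String) (leader_pos : String) (out : Bool) : Prop := out = did_play_card_alt cards_played pos leader_pos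
instance (cards_played : List String) (pos : String) (leader_pos : String) (out : Bool) : Decidable (Spec_did_play_card cards_played pos leader_pos out) := by unfold Spec_did_play_card; infer_instance

-- ===== CLAIM (what is proved, stated in full; the proofs are below) =====
def Claim_equal_did_play_card : Prop := ∀ (cards_played : List String) (pos : String) (leader_pos : String), Dom_did_play_card cards_played pos leader_pos → Pre_did_play_card cards_played pos leader_pos → Spec_did_play_card cards_played pos leader_pos (did_play_card cards_played pos leader_pos)

-- ===== LEMMAS AND PROOFS =====

-- every element of A's rotated list is one of the four seats
lemma pvPlayed_mem_allPos (s n : Nat) (x : String)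
    (hx : x ∈ (List.range n).map (fun i => pvAllPos.getD ((i + s) % 4) "")) :
    x ∈ pvAllPos := by
  obtain ⟨i, _, hfi⟩ := List.mem_map.mp hx
  have h4 : (i + s) % 4 < 4 := Nat.mod_lt _ (by norm_num)
  subst hfi
  interval_cases h : (i + s) % 4 <;> simp [pvAllPos]

-- membership of the p-th seat in the rotated prefix ↔ the modular-offset bound
lemma pvMem_played (s p n : Nat) (hs : s < 4) (hp : p < 4) :
    (pvAllPos.getD p "" ∈ (List.range n).map (fun i => pvAllPos.getD ((i + s) % 4) ""))
      ↔ (p + 4 - s) % 4 < n := by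
  constructor
  · intro h
    obtain ⟨i, hi, hfi⟩ := List.mem_map.mp h
    have hi' := List.mem_range.mp hi
    have h4 : (i + s) % 4 < 4 := Nat.mod_lt _ (by norm_num)
    have hidx : (i + s) % 4 = p := by
      interval_cases p <;> interval_cases h' : (i + s) % 4 <;> simp_all [pvAllPos]
    omega
  · intro h
    refine List.mem_map.mpr ⟨(p + 4 - s) % 4, List.mem_range.mpr h, ?_⟩
    congr 1
    omega

-- the Int-mod offset equals the Nat-mod offset for seat indices < 4
lemma pvIntMod_eq (s p : Nat) (hs : s < 4) (hp : p < 4) :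
    PySem.Int.mod ((p : Int) - (s : Int)) 4 = (((p + 4 - s) % 4 : Nat) : Int) := by
  have h := PySem.Int.mod_eq_emod_of_pos (by norm_num : (0:Int) < 4) (a := (p : Int) - (s : Int))
  rw [h]
  omega

-- core equality once leader's index is some s
lemma pvCore (cards_played : List String) (pos : String) (s : Nat) (hs : s < 4)
    (_hcp : cards_played.length ≠ 0) :
    (if pos ∈ (List.range cards_played.length).map (fun i => pvAllPos.getD ((i + s) % 4) "")
      then true else false)
    = (if pos ∈ pvAllPos then
        decide (PySem.Int.mod ((PySem.List.index? pvAllPos pos).getD 0 - (s : Int)) 4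
                < (cards_played.length : Int))
      else false) := by
  by_cases hp : pos ∈ pvAllPos
  · simp only [hp, if_true]
    -- pos is one of the four seats; name its index p
    have : ∃ p : Nat, p < 4 ∧ pvAllPos.getD p "" = pos ∧
        PySem.List.index? pvAllPos pos = some p := by
      simp only [pvAllPos, List.mem_cons, List.not_mem_nil, or_false] at hp
      rcases hp with h | h | h | h <;> subst h
      · exact ⟨0, by norm_num, rfl, by decide⟩
      · exact ⟨1, by norm_num, rfl, by decide⟩
      · exact ⟨2, by norm_num, rfl, by decide⟩
      · exact ⟨3, by norm_num, rfl, by decide⟩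
    obtain ⟨p, hplt, hgp, hip⟩ := this
    rw [hip]
    simp only [Option.getD_some, pvIntMod_eq s p hs hplt, ← hgp]
    by_cases hmem : (p + 4 - s) % 4 < cards_played.length
    · rw [if_pos ((pvMem_played s p _ hs hplt).mpr hmem)]
      symm
      rw [decide_eq_true_eq]
      exact_mod_cast hmem
    · rw [if_neg (fun h => hmem ((pvMem_played s p _ hs hplt).mp h))]
      symm
      rw [decide_eq_false_iff_not, not_lt]
      exact_mod_cast Nat.le_of_not_lt hmem
  · rw [if_neg hp, if_neg (fun h => hp (pvPlayed_mem_allPos s _ pos h))]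

-- ===== VERDICT (by name: the statement is the Claim_ definition above) =====
theorem did_play_card_spec : Claim_equal_did_play_card := by
  intro cards_played pos leader_pos _ hpre
  unfold Spec_did_play_card did_play_card did_play_card_alt
  by_cases h0 : cards_played.length = 0
  · simp [h0]
  · rw [if_neg h0, if_neg h0]
    have hl : leader_pos ∈ pvAllPos := by
      rcases hpre with h | h
      · exact absurd (by simp [h]) h0
      · exact h
    have : ∃ s : Nat, s < 4 ∧ PySem.List.index? pvAllPos leader_pos = some s := by
      simp only [pvAllPos, List.mem_cons, List.not_mem_nil, or_false] at hl
      rcases hl with h | h | h | h <;> subst h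
      · exact ⟨0, by norm_num, by decide⟩
      · exact ⟨1, by norm_num, by decide⟩
      · exact ⟨2, by norm_num, by decide⟩
      · exact ⟨3, by norm_num, by decide⟩
    obtain ⟨s, hs, hidx⟩ := this
    rw [hidx]
    exact pvCore cards_played pos s hs h0
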